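-- pv_equiv track=rewrite | github.com/xvzc/algorithms | programmers/solved/42840.py | solution
-- ===== SOURCE A (Python) =====
-- def solution(answers):
--     answer = []
--     person1=[1,2,3,4,5]
--     person2=[2,1,2,3,2,4,2,5]
--     person3=[3,3,1,1,2,2,4,4,5,5]
--
--     person1_score=0
--     person2_score=0
--     person3_score=0
--
--     for i in range(len(answers)):
--         if answers[i] == person1[i % 5]:
--             person1_score+=1
--
--         if answers[i] == person2[i % 8]:
--             person2_score+=1
--
--         if answers[i] == person3[i % 10]:
--             person3_score+=1
--
--     max_score = max(person1_score, person2_score, person3_score)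
--
--     if person1_score == max_score:
--         answer.append(1)
--
--     if person2_score == max_score:
--         answer.append(2)
--
--     if person3_score == max_score:
--         answer.append(3)
--
--     return answer
-- ===== SOURCE B (Python) =====
-- def solution(answers):
--     # Histogram approach: 40 = lcm(5, 8, 10), so each pattern's answer at
--     # position i depends only on i % 40.  Build a frequency table of
--     # (i % 40, answer) pairs in one pass, then read each pattern's score
--     # from the 40-entry table instead of rescanning the answers.
--     freq = {}
--     for i, a in enumerate(answers):
--         k = (i % 40, a)
--         freq[k] = freq.get(k, 0) + 1
--     patterns = [[1, 2, 3, 4, 5],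
--                 [2, 1, 2, 3, 2, 4, 2, 5],
--                 [3, 3, 1, 1, 2, 2, 4, 4, 5, 5]]
--     scores = [sum(freq.get((j, p[j % len(p)]), 0) for j in range(40))
--               for p in patterns]
--     best = max(scores)
--     return [k + 1 for k, s in enumerate(scores) if s == best]
-- ===== Notes on version B (the rewrite author's own statement) =====
-- stated objective: alternative
-- what changed: Instead of comparing every answer against all three patterns in one interleaved loop, B builds a histogram of (position mod 40, answer) pairs in a single pass (40 = lcm of the pattern lengths) and then reads each pattern's score as a 40-term table lookup sum, so scoring no longer touches the answers at all.
import Mathlib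
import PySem

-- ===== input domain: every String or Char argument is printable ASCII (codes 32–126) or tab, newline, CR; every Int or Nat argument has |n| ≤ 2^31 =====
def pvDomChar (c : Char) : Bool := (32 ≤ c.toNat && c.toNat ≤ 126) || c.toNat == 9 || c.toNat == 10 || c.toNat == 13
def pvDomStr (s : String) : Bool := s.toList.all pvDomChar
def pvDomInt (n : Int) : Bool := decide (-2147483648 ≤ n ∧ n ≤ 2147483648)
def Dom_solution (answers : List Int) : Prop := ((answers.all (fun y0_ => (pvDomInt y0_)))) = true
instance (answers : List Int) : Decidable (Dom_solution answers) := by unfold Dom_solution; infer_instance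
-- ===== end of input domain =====

-- B replaces A's per-answer comparison against the three patterns by a one-pass histogram of (i % 40, answer) pairs (40 = lcm of the pattern lengths) from which each pattern's score is read off; objective: alternative (same O(n) cost).

-- ===== PORT A =====
-- literal port of A: one loop over range(len(answers)) carrying the three counters
def solution (answers : List Int) : List Int :=
  let person1 : List Int := [1, 2, 3, 4, 5]
  let person2 : List Int := [2, 1, 2, 3, 2, 4, 2, 5]
  let person3 : List Int := [3, 3, 1, 1, 2, 2, 4, 4, 5, 5]
  let s : Int × Int × Int :=
    (PySem.List.pyRange 0 (answers.length : Int) 1).foldl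
      (fun s i =>
        let s1 := if PySem.List.pyGetD answers i 0 = PySem.List.pyGetD person1 (PySem.Int.mod i 5) 0 then s.1 + 1 else s.1
        let s2 := if PySem.List.pyGetD answers i 0 = PySem.List.pyGetD person2 (PySem.Int.mod i 8) 0 then s.2.1 + 1 else s.2.1
        let s3 := if PySem.List.pyGetD answers i 0 = PySem.List.pyGetD person3 (PySem.Int.mod i 10) 0 then s.2.2 + 1 else s.2.2
        (s1, s2, s3)) (0, 0, 0)
  let max_score := max s.1 (max s.2.1 s.2.2)
  (if s.1 = max_score then [1] else []) ++
  (if s.2.1 = max_score then [2] else []) ++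
  (if s.2.2 = max_score then [3] else [])

-- ===== PORT B =====
-- freq = {}; for i, a in enumerate(answers): k = (i % 40, a); freq[k] = freq.get(k, 0) + 1
def solnAltFreq (answers : List Int) : PySem.Dict (Int × Int) Int :=
  (PySem.List.enumerate answers).foldl
    (fun d p =>
      d.insert (PySem.Int.mod p.1 40, p.2)
        (d.getD (PySem.Int.mod p.1 40, p.2) 0 + 1))
    PySem.Dict.empty

-- sum(freq.get((j, p[j % len(p)]), 0) for j in range(40))
def solnAltScore (freq : PySem.Dict (Int × Int) Int) (p : List Int) : Int :=
  ((PySem.List.pyRange 0 40 1).map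
    (fun j => freq.getD (j, PySem.List.pyGetD p (PySem.Int.mod j (p.length : Int)) 0) 0)).sum

def solution_alt (answers : List Int) : List Int :=
  let freq := solnAltFreq answers
  let patterns : List (List Int) :=
    [[1, 2, 3, 4, 5], [2, 1, 2, 3, 2, 4, 2, 5], [3, 3, 1, 1, 2, 2, 4, 4, 5, 5]]
  let scores := patterns.map (solnAltScore freq)
  let best := (PySem.List.max? scores (fun x => x)).getD 0
  ((PySem.List.enumerate scores).filter (fun is => is.2 == best)).map (fun is => is.1 + 1)

-- ===== PRECONDITION & SPEC =====
def Spec_solution (answers : List Int) (out : List Int) : Prop := out = solution_alt answers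
instance (answers : List Int) (out : List Int) : Decidable (Spec_solution answers out) := by unfold Spec_solution; infer_instance

-- ===== CLAIM =====
def Claim_equal_solution : Prop := ∀ (answers : List Int), Dom_solution answers → Spec_solution answers (solution answers)

-- ===== LEMMAS AND PROOFS =====

-- a fold over a triple of independent counters is the triple of folds
theorem foldl_triple {α : Type} (f1 f2 f3 : Int → α → Int) (l : List α) (a b c : Int) :
    l.foldl (fun (s : Int × Int × Int) x => (f1 s.1 x, f2 s.2.1 x, f3 s.2.2 x)) (a, b, c)
      = (l.foldl f1 a, l.foldl f2 b, l.foldl f3 c) := by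
  induction l generalizing a b c with
  | nil => rfl
  | cons x t ih => simp [List.foldl, ih]

-- A's counter for one pattern, as a countP over enumerate(answers)
theorem score_eq (answers p : List Int) (n : Int) :
    (PySem.List.pyRange 0 (answers.length : Int) 1).foldl
      (fun acc i => if PySem.List.pyGetD answers i 0
          = PySem.List.pyGetD p (PySem.Int.mod i n) 0 then acc + 1 else acc) 0
      = ((PySem.List.enumerate answers).countP
          (fun ia => ia.2 == PySem.List.pyGetD p (PySem.Int.mod ia.1 n) 0) : Int) := by
  rw [PySem.List.foldl_ite_add_one]
  rw [PySem.List.enumerate_eq_map_pyRange (d := 0), List.countP_map]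
  simp only [Function.comp_def, PySem.List.len_eq, zero_add]
  norm_cast

-- what B's histogram stores: the multiplicity of the key among (i % 40, answers[i])
theorem freq_getD (answers : List Int) (k : Int × Int) :
    (solnAltFreq answers).getD k 0
      = ((PySem.List.enumerate answers).countP
          (fun ia => ((PySem.Int.mod ia.1 40, ia.2) == k)) : Int) := by
  unfold solnAltFreq
  rw [← List.foldl_map (f := fun p : Int × Int => ((PySem.Int.mod p.1 40, p.2) : Int × Int))
      (g := fun (d : PySem.Dict (Int × Int) Int) x => d.insert x (d.getD x 0 + 1))
      (l := PySem.List.enumerate answers) (init := PySem.Dict.empty)]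
  rw [PySem.Dict.getD_foldl_insert_add_one, PySem.Dict.getD_empty]
  rw [List.count_eq_countP, List.countP_map]
  simp [Function.comp_def]

-- indicator sum over a duplicate-free index list
theorem sum_ind (w : Int → Int) (v : Int) (js : List Int) (hnd : js.Nodup) (m : Int) :
    (js.map (fun j => if m = j ∧ v = w j then (1 : Int) else 0)).sum
      = if m ∈ js ∧ v = w m then 1 else 0 := by
  induction js with
  | nil => simp
  | cons j t ih =>
    rcases List.nodup_cons.mp hnd with ⟨hj, hnt⟩
    rw [List.map_cons, List.sum_cons, ih hnt]
    by_cases hm : m = j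
    · subst hm
      have : m ∉ t := hj
      simp [this]
    · simp [hm]

-- summing the per-residue multiplicities over all residues counts every matching position once
theorem partition (l : List (Int × Int)) (w : Int → Int) :
    ((PySem.List.pyRange 0 40 1).map
      (fun j => (l.countP (fun ia => ((PySem.Int.mod ia.1 40, ia.2) == (j, w j))) : Int))).sum
    = (l.countP (fun ia => ia.2 == w (PySem.Int.mod ia.1 40)) : Int) := by
  induction l with
  | nil => simp
  | cons x t ih =>
    simp only [List.countP_cons]
    have hsplit :
        ((PySem.List.pyRange 0 40 1).map
          (fun j => ((t.countP (fun ia => ((PySem.Int.mod ia.1 40, ia.2) == (j, w j)))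
              + if ((PySem.Int.mod x.1 40, x.2) == (j, w j)) then 1 else 0 : Nat) : Int))).sum
        = ((PySem.List.pyRange 0 40 1).map
            (fun j => (t.countP (fun ia => ((PySem.Int.mod ia.1 40, ia.2) == (j, w j))) : Int))).sum
          + ((PySem.List.pyRange 0 40 1).map
            (fun j => if PySem.Int.mod x.1 40 = j ∧ x.2 = w j then (1 : Int) else 0)).sum := by
      rw [← List.sum_map_add]
      apply congrArg
      apply List.map_congr_left
      intro j _
      push_cast
      simp [Prod.ext_iff]
    rw [hsplit, ih, sum_ind w x.2 _ (by decide) (PySem.Int.mod x.1 40)]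
    have h0 : (0:Int) ≤ x.1 % 40 := Int.emod_nonneg _ (by norm_num)
    have h40 : x.1 % 40 < 40 := Int.emod_lt_of_pos _ (by norm_num)
    push_cast
    simp [PySem.List.mem_pyRange_one, h0, h40]

-- B's score for one pattern equals the countP form of A's counter
theorem scoreB_eq (answers p : List Int) (L : Int) (hL : (p.length : Int) = L)
    (hpos : 0 < L) (hdvd : L ∣ 40) :
    solnAltScore (solnAltFreq answers) p
      = ((PySem.List.enumerate answers).countP
          (fun ia => ia.2 == PySem.List.pyGetD p (PySem.Int.mod ia.1 L) 0) : Int) := by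
  unfold solnAltScore
  rw [hL]
  simp only [freq_getD]
  rw [partition (PySem.List.enumerate answers) (fun j => PySem.List.pyGetD p (PySem.Int.mod j L) 0)]
  have hmod : ∀ i : Int, PySem.Int.mod (PySem.Int.mod i 40) L = PySem.Int.mod i L := by
    intro i
    rw [PySem.Int.mod_eq_emod_of_pos (by norm_num : (0:Int) < 40),
        PySem.Int.mod_eq_emod_of_pos hpos, PySem.Int.mod_eq_emod_of_pos hpos,
        Int.emod_emod_of_dvd _ hdvd]
  congr 1
  apply List.countP_congr
  intro ia _
  rw [hmod ia.1]

-- ===== VERDICT =====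
set_option maxRecDepth 8000 in
theorem solution_spec : Claim_equal_solution := by
  intro answers _
  unfold Spec_solution solution solution_alt
  simp only []
  have hfold := foldl_triple
    (fun acc i => if PySem.List.pyGetD answers i 0 = PySem.List.pyGetD [1,2,3,4,5] (PySem.Int.mod i 5) 0 then acc + 1 else acc)
    (fun acc i => if PySem.List.pyGetD answers i 0 = PySem.List.pyGetD [2,1,2,3,2,4,2,5] (PySem.Int.mod i 8) 0 then acc + 1 else acc)
    (fun acc i => if PySem.List.pyGetD answers i 0 = PySem.List.pyGetD [3,3,1,1,2,2,4,4,5,5] (PySem.Int.mod i 10) 0 then acc + 1 else acc)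
    (PySem.List.pyRange 0 (answers.length : Int) 1) 0 0 0
  rw [hfold]
  simp only [score_eq answers [1,2,3,4,5] 5,
      score_eq answers [2,1,2,3,2,4,2,5] 8,
      score_eq answers [3,3,1,1,2,2,4,4,5,5] 10]
  simp only [List.map_cons, List.map_nil]
  rw [scoreB_eq answers [1,2,3,4,5] 5 (by norm_num) (by norm_num) (by norm_num),
      scoreB_eq answers [2,1,2,3,2,4,2,5] 8 (by norm_num) (by norm_num) (by norm_num),
      scoreB_eq answers [3,3,1,1,2,2,4,4,5,5] 10 (by norm_num) (by norm_num) (by norm_num)]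
  set s1 := ((PySem.List.enumerate answers).countP
      (fun ia => ia.2 == PySem.List.pyGetD [1,2,3,4,5] (PySem.Int.mod ia.1 5) 0) : Int) with hs1
  set s2 := ((PySem.List.enumerate answers).countP
      (fun ia => ia.2 == PySem.List.pyGetD [2,1,2,3,2,4,2,5] (PySem.Int.mod ia.1 8) 0) : Int) with hs2
  set s3 := ((PySem.List.enumerate answers).countP
      (fun ia => ia.2 == PySem.List.pyGetD [3,3,1,1,2,2,4,4,5,5] (PySem.Int.mod ia.1 10) 0) : Int) with hs3
  have hmax : (PySem.List.max? [s1, s2, s3] (fun x => x)).getD 0 = max s1 (max s2 s3) := by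
    rw [PySem.List.max?_id_cons]
    simp [max_assoc]
  rw [hmax]
  simp only [PySem.List.enumerate_cons, PySem.List.enumerate_nil]
  set M := max s1 (max s2 s3) with hM
  by_cases h1 : s1 = M <;>
  by_cases h2 : s2 = M <;>
  by_cases h3 : s3 = M <;>
  simp [h1, h2, h3]
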